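-- pv_equiv track=rewrite | github.com/YuntianCheng/Leetcode | m_1_3.py | solution
-- ===== SOURCE A (Python) =====
-- def solution(A:list, B:list, S:int):
--     # write your code in Python (Python 3.6)
--     if S < len(A):
--         return False
--     choice = set()
--     nums = {}
--     for num in A+B:
--         choice.add(num)
--     if len(choice) < len(A):
--         return False
--     for i in range(len(A)):
--         key = str(A[i])+','+str(B[i]) if A[i] > B[i] else str(B[i])+','+str(A[i])
--         if key not in nums:
--             nums[key] = 1
--         else:
--             nums[key] += 1
--             if nums[key] > 2:
--                 return False
--     return True
-- ===== SOURCE B (Python) =====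
-- def solution(A, B, S):
--     if S < len(A):
--         return False
--     if len(set(A + B)) < len(A):
--         return False
--     pairs = sorted((max(a, b), min(a, b)) for a, b in zip(A, B))
--     prev = None
--     run = 0
--     for p in pairs:
--         run = run + 1 if p == prev else 1
--         if run > 2:
--             return False
--         prev = p
--     return True
-- ===== Notes on version B (the rewrite author's own statement) =====
-- stated objective: alternative
-- what changed: Replaces the hash-dict counting loop over indices (string keys 'max,min') with: canonicalize each zipped pair to (max,min), sort the pair list, and do one linear scan tracking the run length of consecutive equal pairs, failing when a run exceeds 2; the two guards are kept.
-- outside the precondition, e.g. on solution([1, 2], [3], 5): A raises IndexError, B returns True; on solution([1, 1, 1, 2, 3, 4], [1, 1, 1, 5, 6], 6): A returns False, B returns False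
import Mathlib
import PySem

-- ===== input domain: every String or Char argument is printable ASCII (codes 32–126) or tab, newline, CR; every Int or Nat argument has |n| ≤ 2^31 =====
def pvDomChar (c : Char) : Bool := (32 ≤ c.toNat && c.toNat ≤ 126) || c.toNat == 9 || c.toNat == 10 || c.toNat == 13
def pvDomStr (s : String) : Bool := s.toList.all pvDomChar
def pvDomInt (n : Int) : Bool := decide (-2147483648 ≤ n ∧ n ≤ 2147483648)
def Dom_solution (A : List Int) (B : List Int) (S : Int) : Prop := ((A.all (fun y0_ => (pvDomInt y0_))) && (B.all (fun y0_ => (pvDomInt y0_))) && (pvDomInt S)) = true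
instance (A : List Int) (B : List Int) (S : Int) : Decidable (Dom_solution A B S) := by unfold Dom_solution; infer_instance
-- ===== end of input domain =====

-- B is an alternative, structurally different exact re-implementation: it replaces A's
-- hash-dict counting of string keys by sort-the-canonical-pairs + one run-length scan.

-- ===== PORT A =====
-- A's key: str(a)+','+str(b) if a > b else str(b)+','+str(a); strings are modelled on the
-- List Char side (PySem.Int.toChars = str(n).toList), exact.
def pvAKey (a b : Int) : List Char :=
  if a > b then PySem.Int.toChars a ++ ',' :: PySem.Int.toChars b
  else PySem.Int.toChars b ++ ',' :: PySem.Int.toChars a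

-- the 'for i in range(len(A))' loop with early return False
def pvALoop (A B : List Int) : List Nat → PySem.Dict (List Char) Int → Bool
  | [], _ => true
  | i :: rest, nums =>
    let key := pvAKey (A.getD i 0) (B.getD i 0)
    if ¬ nums.contains key then pvALoop A B rest (nums.insert key 1)
    else
      let c := nums.getD key 0 + 1
      if c > 2 then false else pvALoop A B rest (nums.insert key c)

def solution (A : List Int) (B : List Int) (S : Int) : Bool :=
  if S < PySem.List.len A then false
  else
    let choice := (A ++ B).foldl PySem.Set.add PySem.Set.empty
    if PySem.Set.len choice < PySem.List.len A then false
    else pvALoop A B (List.range A.length) PySem.Dict.empty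

-- ===== PORT B =====
-- run-length scan over the sorted canonical pairs (prev = None, run = 0 to start)
def pvAltScan : List (Int × Int) → Option (Int × Int) → Int → Bool
  | [], _, _ => true
  | p :: rest, prev, run =>
    let run' := if some p = prev then run + 1 else 1
    if run' > 2 then false else pvAltScan rest (some p) run'

def solution_alt (A : List Int) (B : List Int) (S : Int) : Bool :=
  if S < PySem.List.len A then false
  else if PySem.Set.len (PySem.Set.ofList (A ++ B)) < PySem.List.len A then false
  else
    let pairs := PySem.List.sorted2
      ((A.zip B).map (fun p => (max p.1 p.2, min p.1 p.2))) Prod.fst Prod.snd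
    pvAltScan pairs none 0

-- ===== PRECONDITION & SPEC =====
-- Pre_ excludes inputs with len(B) < len(A) that pass both guards: there A either raises
-- IndexError (B[i] out of range) or — only when a duplicate pair among the first len(B)
-- positions exits early — returns False; B zips (truncating) and returns normally.
def Pre_solution (A : List Int) (B : List Int) (S : Int) : Prop :=
  B.length < A.length →
    (S < (A.length : Int) ∨ (PySem.Set.ofList (A ++ B)).length < A.length)
instance (A : List Int) (B : List Int) (S : Int) : Decidable (Pre_solution A B S) := by
  unfold Pre_solution; infer_instance

def pvWitness_solution : List Int × List Int × Int := ([1, 2], [2, 3], 5)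

def Spec_solution (A : List Int) (B : List Int) (S : Int) (out : Bool) : Prop := out = solution_alt A B S
instance (A : List Int) (B : List Int) (S : Int) (out : Bool) : Decidable (Spec_solution A B S out) := by unfold Spec_solution; infer_instance

-- ===== CLAIM (what is proved, stated in full; the proofs are below) =====
def Claim_equal_solution : Prop := ∀ (A : List Int) (B : List Int) (S : Int), Dom_solution A B S → Pre_solution A B S → Spec_solution A B S (solution A B S)

-- ===== LEMMAS AND PROOFS =====

lemma pv_digitChar_inj : ∀ m < 10, ∀ n < 10, Nat.digitChar m = Nat.digitChar n → m = n := by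
  decide

lemma pv_toDigits10_inj : ∀ m n : Nat, Nat.toDigits 10 m = Nat.toDigits 10 n → m = n := by
  intro m
  induction m using Nat.strong_induction_on with
  | _ m ih =>
    intro n h
    rw [Nat.toDigits_eq_if (b := 10) (n := m) (by norm_num), Nat.toDigits_eq_if (b := 10) (n := n) (by norm_num)] at h
    by_cases h1 : m < 10 <;> by_cases h2 : n < 10 <;> simp only [h1, h2, if_pos, if_false] at h
    · exact pv_digitChar_inj m h1 n h2 (List.cons.inj h).1
    · have hlen := congrArg List.length h
      simp only [List.length_cons, List.length_append, List.length_nil] at hlen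
      have hpos : 0 < (Nat.toDigits 10 (n / 10)).length := Nat.length_toDigits_pos
      omega
    · have hlen := congrArg List.length h
      simp only [List.length_cons, List.length_append, List.length_nil] at hlen
      have hpos : 0 < (Nat.toDigits 10 (m / 10)).length := Nat.length_toDigits_pos
      omega
    · have h' := List.append_inj' h (by simp)
      have e1 : m / 10 = n / 10 := ih (m / 10) (Nat.div_lt_self (by omega) (by norm_num)) _ h'.1
      have e2 : m % 10 = n % 10 := by
        have := h'.2
        simp at this
        exact pv_digitChar_inj _ (Nat.mod_lt _ (by norm_num)) _ (Nat.mod_lt _ (by norm_num)) this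
      omega

lemma pv_comma_not_mem_toDigits (m : Nat) : ',' ∉ Nat.toDigits 10 m := by
  intro h
  have := Nat.isDigit_of_mem_toDigits (by norm_num) (by norm_num) h
  exact absurd this (by decide)

lemma pv_dash_not_mem_toDigits (m : Nat) : '-' ∉ Nat.toDigits 10 m := by
  intro h
  have := Nat.isDigit_of_mem_toDigits (by norm_num) (by norm_num) h
  exact absurd this (by decide)

lemma pv_toChars_inj : Function.Injective PySem.Int.toChars := by
  intro m n h
  unfold PySem.Int.toChars at h
  split_ifs at h with hm hn hn
  · have := pv_toDigits10_inj _ _ (List.cons.inj h).2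
    omega
  · exact absurd (h ▸ List.mem_cons_self ..) (pv_dash_not_mem_toDigits _)
  · exact absurd (h.symm ▸ List.mem_cons_self ..) (pv_dash_not_mem_toDigits _)
  · have := pv_toDigits10_inj _ _ h
    omega

lemma pv_comma_not_mem_toChars (n : Int) : ',' ∉ PySem.Int.toChars n := by
  unfold PySem.Int.toChars
  split_ifs
  · simp [pv_comma_not_mem_toDigits]
  · exact pv_comma_not_mem_toDigits _

def pvStrKey (p : Int × Int) : List Char :=
  PySem.Int.toChars p.1 ++ ',' :: PySem.Int.toChars p.2



lemma pv_split_comma : ∀ (a : List Char) (b : List Char) (c : List Char) (d : List Char),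
    ',' ∉ a → ',' ∉ c → a ++ ',' :: b = c ++ ',' :: d → a = c ∧ b = d := by
  intro a
  induction a with
  | nil =>
    intro b c d _ hc h
    cases c with
    | nil => simpa using h
    | cons y c' =>
      simp only [List.nil_append, List.cons_append, List.cons.injEq] at h
      exact absurd (h.1 ▸ List.mem_cons_self ..) hc
  | cons x a' ih =>
    intro b c d ha hc h
    cases c with
    | nil =>
      simp only [List.cons_append, List.nil_append, List.cons.injEq] at h
      exact absurd (h.1 ▸ List.mem_cons_self ..) ha
    | cons y c' =>
      simp only [List.cons_append, List.cons.injEq] at h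
      have := ih b c' d (fun hm => ha (List.mem_cons_of_mem _ hm)) (fun hm => hc (List.mem_cons_of_mem _ hm)) h.2
      exact ⟨by simp [h.1, this.1], this.2⟩

lemma pv_strKey_inj : Function.Injective pvStrKey := by
  intro p q h
  unfold pvStrKey at h
  have := pv_split_comma _ _ _ _ (pv_comma_not_mem_toChars _) (pv_comma_not_mem_toChars _) h
  have h1 := pv_toChars_inj this.1
  have h2 := pv_toChars_inj this.2
  exact Prod.ext h1 h2

lemma pv_aKey_eq_strKey (a b : Int) : pvAKey a b = pvStrKey (max a b, min a b) := by
  unfold pvAKey pvStrKey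
  rcases le_or_gt a b with h | h
  · simp [not_lt.mpr h, max_eq_right h, min_eq_left h]
  · simp [h, max_eq_left h.le, min_eq_right h.le]

def pvKLoop : List (List Char) → PySem.Dict (List Char) Int → Bool
  | [], _ => true
  | k :: rest, nums =>
    if ¬ nums.contains k then pvKLoop rest (nums.insert k 1)
    else
      let c := nums.getD k 0 + 1
      if c > 2 then false else pvKLoop rest (nums.insert k c)

lemma pv_aLoop_eq_kLoop (A B : List Int) (idxs : List Nat) (d : PySem.Dict (List Char) Int) :
    pvALoop A B idxs d = pvKLoop (idxs.map (fun i => pvAKey (A.getD i 0) (B.getD i 0))) d := by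
  induction idxs generalizing d with
  | nil => rfl
  | cons i rest ih => simp only [pvALoop, pvKLoop, List.map_cons]; split_ifs <;> simp [ih]

lemma pv_kLoop_step (d : PySem.Dict (List Char) Int) (k : List Char) (v : Int)
    (rest : List (List Char)) (hv : v = d.getD k 0 + 1) (hv2 : v ≤ 2) :
    (∀ j ∈ rest, (d.insert k v).getD j 0 + (rest.count j : Int) ≤ 2) ↔
      (∀ j ∈ k :: rest, d.getD j 0 + ((k :: rest).count j : Int) ≤ 2) := by
  constructor
  · intro L j hj
    by_cases hk : j = k
    · subst hk
      rw [List.count_cons_self]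
      by_cases hm : j ∈ rest
      · have := L j hm
        rw [PySem.Dict.getD_insert, if_pos rfl] at this
        push_cast at this ⊢
        omega
      · rw [List.count_eq_zero_of_not_mem hm]
        push_cast
        omega
    · have hj' : j ∈ rest := by
        rcases List.mem_cons.mp hj with h | h
        · exact absurd h hk
        · exact h
      have := L j hj'
      rw [PySem.Dict.getD_insert, if_neg hk] at this
      rw [List.count_cons_of_ne (Ne.symm hk)]
      exact this
  · intro R j hj
    by_cases hk : j = k
    · subst hk
      have := R j (List.mem_cons_self ..)
      rw [List.count_cons_self] at this
      rw [PySem.Dict.getD_insert, if_pos rfl]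
      push_cast at this ⊢
      omega
    · have := R j (List.mem_cons_of_mem _ hj)
      rw [List.count_cons_of_ne (Ne.symm hk)] at this
      rw [PySem.Dict.getD_insert, if_neg hk]
      exact this

lemma pv_kLoop_true_iff (l : List (List Char)) (d : PySem.Dict (List Char) Int) :
    pvKLoop l d = true ↔ ∀ k ∈ l, d.getD k 0 + (l.count k : Int) ≤ 2 := by
  induction l generalizing d with
  | nil => simp [pvKLoop]
  | cons k rest ih =>
    simp only [pvKLoop]
    by_cases hc : PySem.Dict.contains d k = true
    · rw [if_neg (by simpa using hc)]
      by_cases hgt : d.getD k 0 + 1 > 2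
      · rw [if_pos hgt]
        simp only [Bool.false_eq_true, false_iff]
        intro h
        have := h k (List.mem_cons_self ..)
        rw [List.count_cons_self] at this
        push_cast at this
        omega
      · rw [if_neg hgt, ih, pv_kLoop_step d k _ rest rfl (by omega)]
    · have hc' : PySem.Dict.contains d k = false := by simpa using hc
      rw [if_pos (by simp [hc'])]
      have h0 : d.getD k 0 = 0 := PySem.Dict.getD_of_not_contains _ _ hc'
      rw [ih, pv_kLoop_step d k 1 rest (by omega) (by omega)]

lemma pv_keys_eq (A B : List Int) (h : A.length ≤ B.length) :
    (List.range A.length).map (fun i => pvAKey (A.getD i 0) (B.getD i 0)) =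
      ((A.zip B).map (fun p => (max p.1 p.2, min p.1 p.2))).map pvStrKey := by
  apply List.ext_getElem
  · simp [List.length_zip, Nat.min_eq_left h]
  · intro i h1 h2
    simp only [List.getElem_map, List.getElem_range, List.getElem_zip]
    rw [pv_aKey_eq_strKey]
    have hi : i < A.length := by simpa using h1
    rw [List.getD_eq_getElem _ _ hi, List.getD_eq_getElem _ _ (lt_of_lt_of_le hi h)]

lemma pv_lt_eq : (fun a b : Int × Int =>
      (decide (a.1 < b.1) || (!decide (b.1 < a.1) && decide (a.2 < b.2)))) =
    (fun a b : Int × Int => decide ((toLex a : Lex (Int × Int)) < toLex b)) := by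
  funext a b
  rw [Bool.eq_iff_iff]
  simp only [Bool.or_eq_true, Bool.and_eq_true, Bool.not_eq_true', decide_eq_true_eq,
    decide_eq_false_iff_not, Prod.Lex.lt_iff, ofLex_toLex]
  constructor <;> intro h <;> omega

lemma pv_sorted2_eq (xs : List (Int × Int)) :
    PySem.List.sorted2 xs Prod.fst Prod.snd =
      PySem.List.sorted xs (fun p => (toLex p : Lex (Int × Int))) := by
  exact congrArg
    (fun f => xs.foldl (fun acc x => PySem.List.insertBy f x acc) ([] : List (Int × Int)))
    pv_lt_eq

lemma pv_altScan_spec (l : List (Int × Int)) : ∀ (prev : Option (Int × Int)) (run : Int),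
    l.Pairwise (fun a b => (toLex a : Lex (Int × Int)) ≤ toLex b) →
    (∀ q, prev = some q → ∀ x ∈ l, (toLex q : Lex (Int × Int)) ≤ toLex x) →
    run ≤ 2 →
    (pvAltScan l prev run = true ↔
      ((∀ q, prev = some q → run + (l.count q : Int) ≤ 2) ∧
        ∀ x ∈ l, prev ≠ some x → (l.count x : Int) ≤ 2)) := by
  induction l with
  | nil =>
    intro prev run _ _ hrun
    simp only [pvAltScan, List.count_nil, List.not_mem_nil, false_implies, implies_true,
      and_true, true_iff]
    intro q _
    simpa using hrun
  | cons p rest ih =>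
    intro prev run hl hprev hrun
    have hpl : ∀ x ∈ rest, (toLex p : Lex (Int × Int)) ≤ toLex x :=
      fun x hx => (List.pairwise_cons.mp hl).1 x hx
    have hrest : rest.Pairwise (fun a b => (toLex a : Lex (Int × Int)) ≤ toLex b) :=
      (List.pairwise_cons.mp hl).2
    simp only [pvAltScan]
    by_cases hp : some p = prev
    · obtain rfl := hp.symm
      rw [if_pos rfl]
      by_cases hgt : run + 1 > 2
      · rw [if_pos hgt]
        simp only [Bool.false_eq_true, false_iff, not_and_or]
        left
        intro h
        have := h p rfl
        rw [List.count_cons_self] at this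
        push_cast at this
        omega
      · rw [if_neg hgt,
          ih (some p) (run + 1) hrest
            (fun q hq x hx => by obtain rfl : p = q := Option.some.inj hq; exact hpl x hx)
            (by omega)]
        constructor
        · intro ⟨h1, h2⟩
          constructor
          · intro q hq
            obtain rfl : p = q := Option.some.inj hq
            have := h1 p rfl
            rw [List.count_cons_self]
            push_cast at this ⊢
            omega
          · intro x hx hxp
            have hxne : x ≠ p := fun he => hxp (by rw [he])
            have hx' : x ∈ rest := by
              rcases List.mem_cons.mp hx with h | h
              · exact absurd h hxne
              · exact h
            rw [List.count_cons_of_ne (Ne.symm hxne)]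
            exact h2 x hx' (by simpa using Ne.symm hxne)
        · intro ⟨g1, g2⟩
          constructor
          · intro q hq
            obtain rfl : p = q := Option.some.inj hq
            have := g1 p rfl
            rw [List.count_cons_self] at this
            push_cast at this ⊢
            omega
          · intro x hx hxp
            have hxne : x ≠ p := by
              intro he
              apply hxp
              simpa using he.symm
            rw [← List.count_cons_of_ne (Ne.symm hxne) (l := rest) (b := p)]
            exact g2 x (List.mem_cons_of_mem _ hx) (by simpa using Ne.symm hxne)
    · rw [if_neg hp, if_neg (by omega),
        ih (some p) 1 hrest
          (fun q hq x hx => by obtain rfl : p = q := Option.some.inj hq; exact hpl x hx)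
          (by omega)]
      cases prev with
      | none =>
        constructor
        · intro ⟨h1, h2⟩
          refine ⟨fun q hq => by simp at hq, ?_⟩
          intro x hx _
          by_cases hxp : x = p
          · obtain rfl := hxp
            rw [List.count_cons_self]
            have := h1 x rfl
            push_cast at this ⊢
            omega
          · have hx' : x ∈ rest := by
              rcases List.mem_cons.mp hx with h | h
              · exact absurd h hxp
              · exact h
            rw [List.count_cons_of_ne (Ne.symm hxp)]
            exact h2 x hx' (by simpa using Ne.symm hxp)
        · intro ⟨g1, g2⟩
          constructor
          · intro q hq
            obtain rfl : p = q := Option.some.inj hq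
            have := g2 p (List.mem_cons_self ..) (by simp)
            rw [List.count_cons_self] at this
            push_cast at this ⊢
            omega
          · intro x hx hxp
            have hxne : x ≠ p := by
              intro he
              apply hxp
              simpa using he.symm
            rw [← List.count_cons_of_ne (Ne.symm hxne) (l := rest) (b := p)]
            exact g2 x (List.mem_cons_of_mem _ hx) (by simp)
      | some q =>
        have hqp : q ≠ p := by
          intro he
          exact hp (by rw [he])
        have hqle : (toLex q : Lex (Int × Int)) ≤ toLex p :=
          hprev q rfl p (List.mem_cons_self ..)
        have hqmem : q ∉ p :: rest := by
          intro hq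
          rcases List.mem_cons.mp hq with h | h
          · exact hqp h
          · exact hqp (toLex.injective (le_antisymm (hpl q h) hqle)).symm
        constructor
        · intro ⟨h1, h2⟩
          constructor
          · intro q' hq'
            obtain rfl : q = q' := Option.some.inj hq'
            rw [List.count_eq_zero_of_not_mem hqmem]
            push_cast
            omega
          · intro x hx _
            by_cases hxp : x = p
            · obtain rfl := hxp
              rw [List.count_cons_self]
              have := h1 x rfl
              push_cast at this ⊢
              omega
            · have hx' : x ∈ rest := by
                rcases List.mem_cons.mp hx with h | h
                · exact absurd h hxp
                · exact h
              rw [List.count_cons_of_ne (Ne.symm hxp)]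
              exact h2 x hx' (by simpa using Ne.symm hxp)
        · intro ⟨g1, g2⟩
          constructor
          · intro q' hq'
            obtain rfl : p = q' := Option.some.inj hq'
            have := g2 p (List.mem_cons_self ..) (by simpa using hqp)
            rw [List.count_cons_self] at this
            push_cast at this ⊢
            omega
          · intro x hx hxp
            have hxne : x ≠ p := by
              intro he
              apply hxp
              simpa using he.symm
            have hqx : q ≠ x := fun he => hqmem (he ▸ List.mem_cons_of_mem _ hx)
            rw [← List.count_cons_of_ne (Ne.symm hxne) (l := rest) (b := p)]
            exact g2 x (List.mem_cons_of_mem _ hx) (by simpa using hqx)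

theorem pv_main (A B : List Int) (S : Int) (hpre : Pre_solution A B S) :
    solution A B S = solution_alt A B S := by
  by_cases h1 : S < PySem.List.len A
  · simp only [solution, solution_alt, if_pos h1]
  · simp only [solution, solution_alt, if_neg h1]
    by_cases h2 : PySem.Set.len (PySem.Set.ofList (A ++ B)) < PySem.List.len A
    · have h2' : PySem.Set.len ((A ++ B).foldl PySem.Set.add PySem.Set.empty) <
          PySem.List.len A := h2
      rw [if_pos h2', if_pos h2]
    · have h2' : ¬ PySem.Set.len ((A ++ B).foldl PySem.Set.add PySem.Set.empty) <
          PySem.List.len A := h2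
      have hAB : A.length ≤ B.length := by
        by_contra hBA
        rcases hpre (by omega) with h | h
        · exact h1 (by simpa [PySem.List.len] using h)
        · exact h2 (by simpa [PySem.Set.len, PySem.List.len] using h)
      rw [if_neg h2', if_neg h2]
      set cp := (A.zip B).map (fun p => (max p.1 p.2, min p.1 p.2)) with hcp
      rw [pv_aLoop_eq_kLoop, pv_keys_eq A B hAB, ← hcp]
      have hL : (pvKLoop (cp.map pvStrKey) PySem.Dict.empty = true) ↔
          ∀ p ∈ cp, (cp.count p : Int) ≤ 2 := by
        rw [pv_kLoop_true_iff]
        constructor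
        · intro h p hp
          have := h (pvStrKey p) (List.mem_map_of_mem hp)
          rw [PySem.Dict.getD_empty, List.count_map_of_injective _ _ pv_strKey_inj] at this
          omega
        · intro h k hk
          obtain ⟨p, hp, rfl⟩ := List.mem_map.mp hk
          rw [PySem.Dict.getD_empty, List.count_map_of_injective _ _ pv_strKey_inj]
          have := h p hp
          omega
      have hpw : (PySem.List.sorted2 cp Prod.fst Prod.snd).Pairwise
          (fun a b => (toLex a : Lex (Int × Int)) ≤ toLex b) := by
        rw [pv_sorted2_eq]
        exact PySem.List.sorted_pairwise cp _
      have hperm : (PySem.List.sorted2 cp Prod.fst Prod.snd).Perm cp :=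
        PySem.List.sorted2_perm cp Prod.fst Prod.snd false
      have hR : (pvAltScan (PySem.List.sorted2 cp Prod.fst Prod.snd) none 0 = true) ↔
          ∀ p ∈ cp, (cp.count p : Int) ≤ 2 := by
        rw [pv_altScan_spec _ none 0 hpw (fun q hq => by simp at hq) (by norm_num)]
        constructor
        · intro ⟨_, h⟩ p hp
          have := h p (hperm.mem_iff.mpr hp) (by simp)
          rwa [hperm.count_eq] at this
        · intro h
          refine ⟨fun q hq => by simp at hq, fun x hx _ => ?_⟩
          rw [hperm.count_eq]
          exact h x (hperm.mem_iff.mp hx)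
      rw [Bool.eq_iff_iff, hL, hR]

-- ===== VERDICT (by name: the statement is the Claim_ definition above) =====
theorem solution_spec : Claim_equal_solution := by
  intro A B S _ hpre
  exact pv_main A B S hpre
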